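-- pv_equiv track=rewrite | github.com/kawai-ota/AtCorder_pra | test_B/test.py | solution
-- ===== SOURCE A (Python) =====
-- def solution(nums):
--     n = len(nums)
--     result = []
--
--     for i in range(n):
--         left_max_count = 1
--         left = i - 1
--         while left >= 0 and nums[left] < nums[i]:
--             left_max_count += 1
--             left -= 1
--
--         right_max_count = 1
--         right = i + 1
--         while right < n and nums[right] < nums[i]:
--             right_max_count += 1
--             right += 1
--
--         total_count = left_max_count + right_max_count - 1
--         result.append(total_count)
--
--     return result
-- ===== SOURCE B (Python) =====
-- def _prev_ge(nums):
--     # prev_ge[i] = index of nearest j < i with nums[j] >= nums[i], or -1 (monotonic stack)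
--     prev = []
--     stack = []
--     for i, x in enumerate(nums):
--         while stack and nums[stack[-1]] < x:
--             stack.pop()
--         prev.append(stack[-1] if stack else -1)
--         stack.append(i)
--     return prev
--
-- def solution(nums):
--     n = len(nums)
--     prev = _prev_ge(nums)
--     rev = _prev_ge(nums[::-1])
--     # next_ge[i] (or n if none) = n - 1 - rev[n - 1 - i]
--     return [(n - 1 - rev[n - 1 - i]) - prev[i] - 1 for i in range(n)]
-- ===== Notes on version B (the rewrite author's own statement) =====
-- stated objective: faster
-- what changed: Replaced the per-element left/right while-scans (O(n^2)) by two monotonic-stack passes computing nearest previous/next element >= nums[i] in O(n); answer[i] = next_ge[i] - prev_ge[i] - 1.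
import Mathlib
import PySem

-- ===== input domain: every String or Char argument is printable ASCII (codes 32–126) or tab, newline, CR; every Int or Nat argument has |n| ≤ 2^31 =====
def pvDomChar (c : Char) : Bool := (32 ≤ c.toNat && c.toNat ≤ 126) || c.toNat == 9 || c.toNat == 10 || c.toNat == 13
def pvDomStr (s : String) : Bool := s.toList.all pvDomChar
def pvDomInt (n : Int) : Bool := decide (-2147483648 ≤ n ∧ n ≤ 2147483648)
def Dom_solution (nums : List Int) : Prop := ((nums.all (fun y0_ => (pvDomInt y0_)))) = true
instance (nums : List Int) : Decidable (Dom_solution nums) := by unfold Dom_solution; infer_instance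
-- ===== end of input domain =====

-- B replaces A's per-element left/right while-scans by two monotonic-stack passes
-- (nearest previous/next element >= nums[i]); objective: faster (asymptotic, O(n^2) -> O(n)).


-- ===== PORT A =====
-- A's inner `while left >= 0 and nums[left] < nums[i]` loop
def aLeft (nums : List Int) (pv : Int) (left : Int) (cnt : Int) : Int :=
  if h : 0 ≤ left ∧ PySem.List.pyGetD nums left 0 < pv then
    aLeft nums pv (left - 1) (cnt + 1)
  else cnt
termination_by (left + 1).toNat
decreasing_by omega

-- A's inner `while right < n and nums[right] < nums[i]` loop
def aRight (nums : List Int) (pv : Int) (right : Int) (cnt : Int) : Int :=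
  if h : right < (nums.length : Int) ∧ PySem.List.pyGetD nums right 0 < pv then
    aRight nums pv (right + 1) (cnt + 1)
  else cnt
termination_by ((nums.length : Int) - right).toNat
decreasing_by omega

def solution (nums : List Int) : List Int :=
  let n : Int := nums.length
  (PySem.List.pyRange 0 n 1).foldl (fun result i =>
    let pv := PySem.List.pyGetD nums i 0
    let leftCount := aLeft nums pv (i - 1) 1
    let rightCount := aRight nums pv (i + 1) 1
    result ++ [leftCount + rightCount - 1]) []

-- ===== PORT B =====
-- Source B's `while stack and nums[stack[-1]] < x: stack.pop()` (stack head = top)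
def bPop (nums : List Int) (x : Int) : List Int → List Int
  | [] => []
  | t :: s => if PySem.List.pyGetD nums t 0 < x then bPop nums x s else t :: s

-- one iteration of Source B's `for i, x in enumerate(nums)` body; state = (prev, stack)
def bStep (nums : List Int) (st : List Int × List Int) (ix : Int × Int) : List Int × List Int :=
  let s := bPop nums ix.2 st.2
  (st.1 ++ [s.headD (-1)], ix.1 :: s)

-- Source B's _prev_ge
def prevGE (nums : List Int) : List Int :=
  ((PySem.List.enumerate nums 0).foldl (bStep nums) ([], [])).1

def solution_alt (nums : List Int) : List Int :=
  let n : Int := nums.length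
  let prev := prevGE nums
  let rev := prevGE nums.reverse   -- nums[::-1]
  (PySem.List.pyRange 0 n 1).map (fun i =>
    (n - 1 - PySem.List.pyGetD rev (n - 1 - i) 0) - PySem.List.pyGetD prev i 0 - 1)

-- ===== PRECONDITION & SPEC =====
def Spec_solution (nums : List Int) (out : List Int) : Prop := out = solution_alt nums
instance (nums : List Int) (out : List Int) : Decidable (Spec_solution nums out) := by unfold Spec_solution; infer_instance

-- ===== CLAIM (what is proved, stated in full; the proofs are below) =====
def Claim_equal_solution : Prop := ∀ (nums : List Int), Dom_solution nums → Spec_solution nums (solution nums)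

-- ===== LEMMAS AND PROOFS =====

-- value at a (Nat) index, 0 out of range (indices used are always in range)
def vAt (nums : List Int) (t : Nat) : Int := nums.getD t 0

-- length of the run of values < pv at indices i-1, i-2, … (A's left scan, counted)
def cDown (nums : List Int) (pv : Int) : Nat → Nat
  | 0 => 0
  | k + 1 => if vAt nums k < pv then cDown nums pv k + 1 else 0

-- nearest j < i with nums[j] >= nums[i], as Int (-1 if none)
def gl (nums : List Int) (i : Nat) : Int := (i : Int) - 1 - cDown nums (vAt nums i) i

lemma cDown_le (nums : List Int) (pv : Int) : ∀ i : Nat, cDown nums pv i ≤ i := by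
  intro i
  induction i with
  | zero => simp [cDown]
  | succ k ih => rw [cDown]; split <;> omega

lemma gl_lt (nums : List Int) (i : Nat) : gl nums i < (i : Int) := by
  unfold gl
  have := cDown_le nums (vAt nums i) i
  omega

lemma cDown_lt (nums : List Int) (pv : Int) :
    ∀ i t : Nat, i - cDown nums pv i ≤ t → t < i → vAt nums t < pv := by
  intro i
  induction i with
  | zero => omega
  | succ k ih =>
    intro t h1 h2
    rw [cDown] at h1
    by_cases hv : vAt nums k < pv
    · rw [if_pos hv] at h1
      rcases Nat.lt_succ_iff_lt_or_eq.mp h2 with h | h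
      · exact ih t (by omega) h
      · exact h ▸ hv
    · rw [if_neg hv] at h1; omega

lemma le_cDown (nums : List Int) (pv : Int) (j : Nat) :
    ∀ i : Nat, (∀ k : Nat, j ≤ k → k < i → vAt nums k < pv) → i - j ≤ cDown nums pv i := by
  intro i
  induction i with
  | zero => omega
  | succ k ih =>
    intro h
    rw [cDown]
    by_cases hk : j ≤ k
    · rw [if_pos (h k hk (by omega))]
      have := ih (fun k' hk' h2 => h k' hk' (by omega))
      omega
    · omega

-- the g-chain i, gl i, gl (gl i), …  (= the monotonic stack contents, top first)
def chainL (nums : List Int) (i : Nat) : List Int :=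
  if _h : 0 ≤ gl nums i then (i : Int) :: chainL nums (gl nums i).toNat else [(i : Int)]
termination_by i
decreasing_by have := gl_lt nums i; omega

lemma chainL_headD (nums : List Int) (i : Nat) : (chainL nums i).headD (-1) = (i : Int) := by
  rw [chainL]; split <;> simp

lemma gl_neg (nums : List Int) (i : Nat) (h : ¬ 0 ≤ gl nums i) : gl nums i = -1 := by
  unfold gl at *
  have := cDown_le nums (vAt nums i) i
  omega

lemma bPop_chain_stay (nums : List Int) (x : Int) (j : Nat) (h : ¬ vAt nums j < x) :
    bPop nums x (chainL nums j) = chainL nums j := by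
  rw [chainL]
  split <;>
    · simp only [bPop, PySem.List.pyGetD_natCast]
      rw [if_neg (by simpa [vAt] using h)]

-- key stack lemma: popping values < nums[i] from the chain of j yields the chain of gl i
lemma pop_chain (nums : List Int) (i : Nat) :
    ∀ j : Nat, j < i → (∀ k : Nat, j < k → k < i → vAt nums k < vAt nums i) →
    bPop nums (vAt nums i) (chainL nums j)
      = if 0 ≤ gl nums i then chainL nums (gl nums i).toNat else [] := by
  intro j
  induction j using Nat.strong_induction_on with
  | _ j IH =>
    intro hji hwin
    by_cases hv : vAt nums j < vAt nums i
    · -- top is popped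
      rw [chainL]
      have hpop : ∀ s, bPop nums (vAt nums i) ((j : Int) :: s) = bPop nums (vAt nums i) s := by
        intro s
        simp only [bPop, PySem.List.pyGetD_natCast]
        rw [if_pos (by simpa [vAt] using hv)]
      by_cases h0 : 0 ≤ gl nums j
      · rw [dif_pos h0, hpop]
        set j' := (gl nums j).toNat with hj'
        have hj'j : j' < j := by have := gl_lt nums j; omega
        have hcle : cDown nums (vAt nums j) j ≤ j := cDown_le nums (vAt nums j) j
        have hj'val : (j' : Int) = (j : Int) - 1 - cDown nums (vAt nums j) j := by
          unfold gl at h0 hj'; omega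
        refine IH j' hj'j (by omega) ?_
        intro k hk1 hk2
        rcases lt_trichotomy k j with h | h | h
        · have : vAt nums k < vAt nums j := by
            refine cDown_lt nums (vAt nums j) j k (by omega) h
          exact this.trans hv
        · exact h ▸ hv
        · exact hwin k h hk2
      · -- chain of j is just [j]; everything below j is < nums[j] < nums[i]
        rw [dif_neg h0, hpop]
        have hcj : cDown nums (vAt nums j) j = j := by
          unfold gl at h0
          have := cDown_le nums (vAt nums j) j
          omega
        have hall : ∀ k : Nat, 0 ≤ k → k < i → vAt nums k < vAt nums i := by
          intro k _ hk
          rcases lt_trichotomy k j with h | h | h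
          · exact (cDown_lt nums (vAt nums j) j k (by omega) h).trans hv
          · exact h ▸ hv
          · exact hwin k h hk
        have : (i : Nat) - 0 ≤ cDown nums (vAt nums i) i := le_cDown nums (vAt nums i) 0 i hall
        have hgi : ¬ 0 ≤ gl nums i := by
          unfold gl
          have := cDown_le nums (vAt nums i) i
          omega
        rw [if_neg hgi]
        simp [bPop]
    · -- top stays: gl i = j
      have hge : i - (j + 1) ≤ cDown nums (vAt nums i) i :=
        le_cDown nums (vAt nums i) (j + 1) i (fun k hk1 hk2 => hwin k (by omega) hk2)
      have hlt : cDown nums (vAt nums i) i < i - j := by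
        by_contra hc
        exact hv (cDown_lt nums (vAt nums i) i j (by omega) hji)
      have hc : cDown nums (vAt nums i) i = i - j - 1 := by omega
      have hgi : gl nums i = (j : Int) := by unfold gl; rw [hc]; omega
      have hgi0 : 0 ≤ gl nums i := by rw [hgi]; positivity
      rw [if_pos hgi0]
      have htn : (gl nums i).toNat = j := by rw [hgi]; simp
      rw [htn]
      exact bPop_chain_stay nums (vAt nums i) j hv

-- invariant of Source B's forward pass
lemma pass_inv (nums : List Int) :
    ∀ m : Nat, m ≤ nums.length →
      ((PySem.List.pyRange 0 (m : Int) 1).map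
          (fun j => (j, PySem.List.pyGetD nums j 0))).foldl (bStep nums) ([], [])
        = ((List.range m).map (fun k => gl nums k),
           if m = 0 then [] else chainL nums (m - 1)) := by
  intro m
  induction m with
  | zero => intro _; simp [PySem.List.pyRange_one_eq_nil]
  | succ k ih =>
    intro hm
    have hsplit : PySem.List.pyRange 0 ((k : Int) + 1) 1
        = PySem.List.pyRange 0 (k : Int) 1 ++ [(k : Int)] :=
      PySem.List.pyRange_one_succ_right (by positivity)
    rw [show ((k + 1 : Nat) : Int) = (k : Int) + 1 by push_cast; ring, hsplit,
        List.map_append, List.foldl_append, ih (by omega)]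
    simp only [List.map_cons, List.map_nil, List.foldl_cons, List.foldl_nil, bStep,
      PySem.List.pyGetD_natCast]
    rcases Nat.eq_zero_or_pos k with hk | hk
    · subst hk
      have hgl0 : gl nums 0 = -1 := by unfold gl; simp [cDown]
      rw [if_pos rfl, chainL]
      simp [hgl0, bPop, List.range_succ]
    · rw [if_neg (by omega)]
      have hpop := pop_chain nums k (k - 1) (by omega) (by intro k' h1 h2; omega)
      have hget : nums.getD k 0 = vAt nums k := rfl
      rw [hget, hpop]
      simp only [Prod.mk.injEq]
      constructor
      · rw [List.range_succ, List.map_append]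
        congr 1
        by_cases h0 : 0 ≤ gl nums k
        · rw [if_pos h0, chainL_headD]
          simp [Int.toNat_of_nonneg h0]
        · rw [if_neg h0]
          simp [gl_neg nums k h0]
      · rw [if_neg (by omega : ¬ k + 1 = 0), Nat.add_sub_cancel]
        by_cases h0 : 0 ≤ gl nums k
        · rw [if_pos h0]
          conv_rhs => rw [chainL]
          rw [dif_pos h0]
        · rw [if_neg h0]
          conv_rhs => rw [chainL]
          rw [dif_neg h0]

lemma prevGE_eq (nums : List Int) :
    prevGE nums = (List.range nums.length).map (fun k => gl nums k) := by
  unfold prevGE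
  rw [PySem.List.enumerate_eq_map_pyRange nums 0]
  have h := pass_inv nums nums.length le_rfl
  simp only [PySem.List.len] at *
  rw [h]

-- A's left loop counts the run below i
lemma aLeft_eq (nums : List Int) (pv : Int) :
    ∀ (k : Nat) (cnt : Int), aLeft nums pv ((k : Int) - 1) cnt = cnt + cDown nums pv k := by
  intro k
  induction k with
  | zero =>
    intro cnt
    rw [aLeft, dif_neg (by rintro ⟨h, -⟩; omega)]
    simp [cDown]
  | succ k ih =>
    intro cnt
    have hidx : ((k + 1 : Nat) : Int) - 1 = (k : Int) := by push_cast; ring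
    rw [hidx, aLeft]
    simp only [PySem.List.pyGetD_natCast]
    rw [cDown]
    by_cases hv : vAt nums k < pv
    · rw [dif_pos ⟨by positivity, by simpa [vAt] using hv⟩, if_pos hv, ih]
      push_cast; ring
    · rw [dif_neg (by rintro ⟨-, h⟩; exact hv (by simpa [vAt] using h)), if_neg hv]
      simp

lemma vAt_rev (nums : List Int) (k : Nat) (h : k < nums.length) :
    vAt nums.reverse (nums.length - 1 - k) = vAt nums k := by
  unfold vAt
  have h1 : nums.length - 1 - k < nums.reverse.length := by rw [List.length_reverse]; omega
  rw [List.getD_eq_getElem _ _ h1, List.getD_eq_getElem _ _ h, List.getElem_reverse]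
  congr 1
  omega

-- A's right loop counts the run above k, seen as a down-run of the reversed list
lemma aRight_eq (nums : List Int) (pv : Int) :
    ∀ (f k : Nat), k + f = nums.length → ∀ cnt : Int,
      aRight nums pv (k : Int) cnt = cnt + cDown nums.reverse pv f := by
  intro f
  induction f with
  | zero =>
    intro k hk cnt
    rw [aRight, dif_neg (by rintro ⟨h, -⟩; omega)]
    simp [cDown]
  | succ f ih =>
    intro k hk cnt
    rw [aRight]
    simp only [PySem.List.pyGetD_natCast]
    rw [cDown]
    have hrv : vAt nums.reverse f = vAt nums k := by
      have := vAt_rev nums k (by omega)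
      rwa [show nums.length - 1 - k = f by omega] at this
    have hkn : (k : Int) < (nums.length : Int) := by exact_mod_cast (by omega : k < nums.length)
    by_cases hv : vAt nums k < pv
    · rw [dif_pos ⟨hkn, by simpa [vAt] using hv⟩]
      rw [show (k : Int) + 1 = ((k + 1 : Nat) : Int) by push_cast; ring,
          ih (k + 1) (by omega)]
      rw [hrv, if_pos hv]
      push_cast; ring
    · rw [dif_neg (by rintro ⟨-, h⟩; exact hv (by simpa [vAt] using h)), hrv, if_neg hv]
      simp

lemma solution_eq_alt (nums : List Int) : solution nums = solution_alt nums := by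
  unfold solution solution_alt
  rw [PySem.List.foldl_append_singleton_eq_map, List.nil_append]
  refine List.map_congr_left ?_
  intro i hi
  rw [PySem.List.mem_pyRange_one] at hi
  obtain ⟨k, rfl⟩ : ∃ k : Nat, i = (k : Int) := ⟨i.toNat, by omega⟩
  have hk : k < nums.length := by exact_mod_cast hi.2
  simp only [PySem.List.pyGetD_natCast]
  set pv := nums.getD k 0 with hpv
  have hpv' : pv = vAt nums k := rfl
  -- A side
  rw [show (k : Int) + 1 = ((k + 1 : Nat) : Int) by push_cast; ring]
  rw [aLeft_eq nums pv k 1, aRight_eq nums pv (nums.length - (k + 1)) (k + 1) (by omega) 1]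
  -- B side
  rw [prevGE_eq, prevGE_eq]
  rw [show ((nums.length : Int)) - 1 - (k : Int) = ((nums.length - 1 - k : Nat) : Int) by omega]
  simp only [PySem.List.pyGetD_natCast]
  rw [List.length_reverse]
  have hgd : ∀ (f : Nat → Int) (n t : Nat), t < n → ((List.range n).map f).getD t 0 = f t := by
    intro f n t ht
    rw [List.getD_eq_getElem?_getD, List.getElem?_map, List.getElem?_range ht]
    rfl
  rw [hgd _ nums.length (nums.length - 1 - k) (by omega), hgd _ nums.length k hk]
  unfold gl
  rw [vAt_rev nums k hk]
  rw [show nums.length - 1 - k = nums.length - (k + 1) by omega]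
  rw [← hpv']
  have h1 := cDown_le nums pv k
  have h2 := cDown_le nums.reverse pv (nums.length - (k + 1))
  omega

-- ===== VERDICT (by name: the statement is the Claim_ definition above) =====
theorem solution_spec : Claim_equal_solution := by
  intro nums _
  unfold Spec_solution
  exact solution_eq_alt nums
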